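-- pv_equiv track=rewrite | github.com/zhhu1996/Code-for-Review | 501_600/544.py | findContestMatch
-- ===== SOURCE A (Python) =====
-- def findContestMatch(n: int) -> str:
--     """输出比赛匹配对"""
--     def findMatch(now):
--         if len(now) < 2:
--             return now
--         result = []
--         for i in range(len(now)//2):
--             s = "(" + str(now[i]) + "," + str(now[len(now)-1-i]) + ")"
--             result.append(s)
--         return findMatch(result)
--
--     nums = [i for i in range(1,n+1)]
--     return findMatch(nums)[0]
-- ===== SOURCE B (Python) =====
-- def findContestMatch(n: int) -> str:
--     """Iterative reduction: keep a flat list of bracketed team strings and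
--     repeatedly pair the outermost entries until one string remains."""
--     now = [str(i) for i in range(1, n + 1)]
--     while len(now) > 1:
--         now = ["(" + now[i] + "," + now[len(now) - 1 - i] + ")"
--                for i in range(len(now) // 2)]
--     return now[0]
-- ===== Notes on version B (the rewrite author's own statement) =====
-- stated objective: simpler
-- what changed: Replaced the recursive int/str-mixed findMatch helper (inner for-loop with append) with a flat iterative while-loop over a single list of strings built by a comprehension.
-- outside the precondition, e.g. on findContestMatch(1): A returns 1, B returns '1'; on findContestMatch(0): A raises IndexError, B raises IndexError
import Mathlib
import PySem

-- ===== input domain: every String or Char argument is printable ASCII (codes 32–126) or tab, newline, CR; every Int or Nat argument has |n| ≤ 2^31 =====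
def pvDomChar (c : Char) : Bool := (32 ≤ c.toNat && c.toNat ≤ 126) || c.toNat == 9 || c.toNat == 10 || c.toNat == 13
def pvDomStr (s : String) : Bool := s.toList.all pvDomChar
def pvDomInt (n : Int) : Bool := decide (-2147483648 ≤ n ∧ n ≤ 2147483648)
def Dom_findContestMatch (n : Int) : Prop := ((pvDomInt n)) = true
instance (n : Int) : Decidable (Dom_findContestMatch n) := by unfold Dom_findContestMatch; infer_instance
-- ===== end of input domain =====

-- B replaces A's recursive helper by a flat iterative while-loop over one list of strings (objective: simpler).

-- ===== PORT A =====
-- Python's findMatch is called first on a list of ints, afterwards on lists of strings;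
-- the two monomorphic helpers below are that one dynamically-typed body, step for step.

-- first call's loop body: now is the list of ints, str(now[i]) = PySem.Int.toStr
def pvStepAInt (now : List Int) : List String :=
  (PySem.List.pyRange 0 (PySem.Int.floordiv (now.length : Int) 2) 1).foldl
    (fun result i =>
      result ++ ["(" ++ PySem.Int.toStr (PySem.List.pyGetD now i 0) ++ ","
                 ++ PySem.Int.toStr (PySem.List.pyGetD now ((now.length : Int) - 1 - i) 0) ++ ")"])
    []

-- recursive calls' loop body: now is a list of strings, str is the identity
def pvStepAStr (now : List String) : List String :=
  (PySem.List.pyRange 0 (PySem.Int.floordiv (now.length : Int) 2) 1).foldl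
    (fun result i =>
      result ++ ["(" ++ PySem.List.pyGetD now i "" ++ ","
                 ++ PySem.List.pyGetD now ((now.length : Int) - 1 - i) "" ++ ")"])
    []

theorem pvStepAStr_length (now : List String) : (pvStepAStr now).length = now.length / 2 := by
  unfold pvStepAStr
  rw [PySem.List.foldl_append_singleton_eq_map, List.nil_append, List.length_map, PySem.List.length_pyRange_one]
  have h : PySem.Int.floordiv (now.length : Int) 2 = ((now.length / 2 : Nat) : Int) :=
    by exact_mod_cast PySem.Int.floordiv_natCast now.length 2
  omega

def pvFindMatchA (now : List String) : List String :=
  if now.length < 2 then now else pvFindMatchA (pvStepAStr now)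
termination_by now.length
decreasing_by
  rw [pvStepAStr_length]; omega

def findContestMatch (n : Int) : String :=
  let nums := PySem.List.pyRange 1 (n + 1) 1
  -- Python: findMatch(nums)[0].  For len(nums) < 2 Python returns a non-string (n = 1: the
  -- int 1) or raises IndexError (n ≤ 0); both cases are outside Pre_ and "" stands in here.
  if nums.length < 2 then ""
  else PySem.List.pyGetD (pvFindMatchA (pvStepAInt nums)) 0 ""

-- ===== PORT B =====
def pvStepB (now : List String) : List String :=
  (List.range (now.length / 2)).map (fun i =>
    "(" ++ now.getD i "" ++ "," ++ now.getD (now.length - 1 - i) "" ++ ")")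

def pvLoopB (now : List String) : List String :=
  if 1 < now.length then pvLoopB (pvStepB now) else now
termination_by now.length
decreasing_by
  simp only [pvStepB, List.length_map, List.length_range]; omega

def findContestMatch_alt (n : Int) : String :=
  let now := (PySem.List.pyRange 1 (n + 1) 1).map PySem.Int.toStr
  (pvLoopB now).getD 0 ""

-- ===== PRECONDITION & SPEC =====
-- Pre_ excludes n ≤ 0, where A raises IndexError, and n = 1, where A returns the Python
-- int 1 rather than a value of the declared str return type (B returns the string "1").
def Pre_findContestMatch (n : Int) : Prop := 2 ≤ n
instance (n : Int) : Decidable (Pre_findContestMatch n) := by unfold Pre_findContestMatch; infer_instance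
def pvWitness_findContestMatch : Int := (4)

def Spec_findContestMatch (n : Int) (out : String) : Prop := out = findContestMatch_alt n
instance (n : Int) (out : String) : Decidable (Spec_findContestMatch n out) := by unfold Spec_findContestMatch; infer_instance

-- ===== CLAIM (what is proved, stated in full; the proofs are below) =====
def Claim_equal_findContestMatch : Prop := ∀ (n : Int), Dom_findContestMatch n → Pre_findContestMatch n → Spec_findContestMatch n (findContestMatch n)

-- ===== LEMMAS AND PROOFS =====

-- A's string-level pairing pass computes B's comprehension
theorem pvStepAStr_eq (now : List String) : pvStepAStr now = pvStepB now := by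
  unfold pvStepAStr pvStepB
  rw [PySem.List.foldl_append_singleton_eq_map, List.nil_append]
  have h2 : PySem.Int.floordiv (now.length : Int) 2 = ((now.length / 2 : Nat) : Int) :=
    by exact_mod_cast PySem.Int.floordiv_natCast now.length 2
  rw [h2, PySem.List.pyRange_zero_nat, List.map_map]
  refine List.map_congr_left ?_
  intro k hk
  rw [List.mem_range] at hk
  have hk' : k < now.length := by omega
  have hidx : ((now.length : Int) - 1 - (k : Int)) = ((now.length - 1 - k : Nat) : Int) := by omega
  simp [hidx, PySem.List.pyGetD_natCast]

-- A's first (int-level) pass equals B's pass on the stringified list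
theorem pvStepAInt_eq (l : List Int) :
    pvStepAInt l = pvStepB (l.map PySem.Int.toStr) := by
  unfold pvStepAInt pvStepB
  rw [PySem.List.foldl_append_singleton_eq_map, List.nil_append]
  have h2 : PySem.Int.floordiv (l.length : Int) 2 = ((l.length / 2 : Nat) : Int) :=
    by exact_mod_cast PySem.Int.floordiv_natCast l.length 2
  rw [h2, PySem.List.pyRange_zero_nat, List.map_map, List.length_map]
  refine List.map_congr_left ?_
  intro k hk
  rw [List.mem_range] at hk
  have hk' : k < l.length := by omega
  have hk2 : l.length - 1 - k < l.length := by omega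
  have hidx : ((l.length : Int) - 1 - (k : Int)) = ((l.length - 1 - k : Nat) : Int) := by omega
  simp [hidx, PySem.List.pyGetD_natCast, List.getD_eq_getElem?_getD, hk', hk2]

-- A's recursion and B's while-loop are the same reduction
theorem pvFindMatchA_eq (now : List String) : pvFindMatchA now = pvLoopB now := by
  unfold pvFindMatchA pvLoopB
  by_cases h : now.length < 2
  · simp [h, show ¬ 1 < now.length by omega]
  · rw [if_neg h, if_pos (by omega), pvStepAStr_eq, pvFindMatchA_eq (pvStepB now)]
termination_by now.length
decreasing_by
  simp only [pvStepB, List.length_map, List.length_range]; omega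

-- ===== VERDICT (by name: the statement is the Claim_ definition above) =====
theorem findContestMatch_spec : Claim_equal_findContestMatch := by
  intro n _ hpre
  unfold Pre_findContestMatch at hpre
  show findContestMatch n = findContestMatch_alt n
  unfold findContestMatch findContestMatch_alt
  have hlen : (PySem.List.pyRange 1 (n + 1) 1).length = n.toNat := by
    rw [PySem.List.length_pyRange_one]; omega
  have hge : ¬ (PySem.List.pyRange 1 (n + 1) 1).length < 2 := by omega
  simp only [hge, if_false]
  rw [pvStepAInt_eq, pvFindMatchA_eq]
  rw [show pvLoopB ((PySem.List.pyRange 1 (n + 1) 1).map PySem.Int.toStr)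
        = pvLoopB (pvStepB ((PySem.List.pyRange 1 (n + 1) 1).map PySem.Int.toStr)) by
      rw [pvLoopB]; rw [if_pos (by simp [hlen]; omega)]]
  exact PySem.List.pyGetD_zero _ _
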